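-- pv_equiv track=rewrite | github.com/ondatk68/bass_server | tutorial/main_web.py | make_scale
-- ===== SOURCE A (Python) =====
-- chord_num={'C':0, 'D':2, 'E':4, 'F':5, 'G':7, 'A':9, 'B':11}
--
-- def make_scale(key):
--     root=chord_num[key[0]]
--     if key[-1]!='m':
--         scale=[root,root+2,root+4,root+5,root+7,root+9,root+11]
--     else:
--         scale=[root,root+2,root+3,root+5,root+7,root+8,root+10]
--
--     scale=[i%12 for i in scale]
--
--     return scale
-- ===== SOURCE B (Python) =====
-- chord_num = {'C': 0, 'D': 2, 'E': 4, 'F': 5, 'G': 7, 'A': 9, 'B': 11}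
--
-- def make_scale(key):
--     root = chord_num[key[0]]
--     steps = [2, 2, 1, 2, 2, 2] if key[-1] != 'm' else [2, 1, 2, 2, 1, 2]
--     scale = [root % 12]
--     pc = root
--     for s in steps:
--         pc += s
--         scale.append(pc % 12)
--     return scale
-- ===== Notes on version B (the rewrite author's own statement) =====
-- stated objective: alternative
-- what changed: B replaces A's two literal offset tables and the trailing list-comprehension %12 pass by the two interval step patterns and a single accumulating scan that emits each pitch class as it goes.
import Mathlib
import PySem

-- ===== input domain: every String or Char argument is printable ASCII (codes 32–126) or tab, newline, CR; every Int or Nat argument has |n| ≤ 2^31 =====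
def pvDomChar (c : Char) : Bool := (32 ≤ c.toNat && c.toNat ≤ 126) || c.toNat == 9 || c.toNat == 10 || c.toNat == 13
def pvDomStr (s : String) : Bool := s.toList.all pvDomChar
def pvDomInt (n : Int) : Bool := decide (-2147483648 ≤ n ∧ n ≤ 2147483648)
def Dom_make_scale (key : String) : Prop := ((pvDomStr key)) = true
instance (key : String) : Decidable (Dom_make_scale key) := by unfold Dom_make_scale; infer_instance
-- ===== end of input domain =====

-- B builds the scale by an accumulating interval-step scan instead of A's two literal
-- offset tables followed by a %12 comprehension (objective: alternative decomposition).

-- shared module constant chord_num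
def chordNum : PySem.Dict Char Int :=
  PySem.Dict.ofList [('C', 0), ('D', 2), ('E', 4), ('F', 5), ('G', 7), ('A', 9), ('B', 11)]

-- ===== PORT A =====
def make_scale (key : String) : List Int :=
  match PySem.Str.pyGet? key 0 with
  | none => []  -- IndexError: outside Pre_
  | some c0 =>
    match PySem.Dict.get? chordNum c0 with
    | none => []  -- KeyError: outside Pre_
    | some root =>
      let scale : List Int :=
        if PySem.Str.pyGet? key (-1) ≠ some 'm' then
          [root, root + 2, root + 4, root + 5, root + 7, root + 9, root + 11]
        else
          [root, root + 2, root + 3, root + 5, root + 7, root + 8, root + 10]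
      scale.map (fun i => PySem.Int.mod i 12)

-- ===== PORT B =====
def make_scale_alt (key : String) : List Int :=
  match PySem.Str.pyGet? key 0 with
  | none => []  -- IndexError: outside Pre_
  | some c0 =>
    match PySem.Dict.get? chordNum c0 with
    | none => []  -- KeyError: outside Pre_
    | some root =>
      let steps : List Int :=
        if PySem.Str.pyGet? key (-1) ≠ some 'm' then [2, 2, 1, 2, 2, 2] else [2, 1, 2, 2, 1, 2]
      (steps.foldl
        (fun (acc : List Int × Int) s =>
          (acc.1 ++ [PySem.Int.mod (acc.2 + s) 12], acc.2 + s))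
        ([PySem.Int.mod root 12], root)).1

-- ===== PRECONDITION & SPEC =====
-- Pre_ excludes exactly the inputs where A raises: the empty key (IndexError) and a
-- first character that is not one of the seven note letters (KeyError).
def Pre_make_scale (key : String) : Prop :=
  key.toList ≠ [] ∧ key.toList.headI ∈ (['C', 'D', 'E', 'F', 'G', 'A', 'B'] : List Char)
instance (key : String) : Decidable (Pre_make_scale key) := by unfold Pre_make_scale; infer_instance

def pvWitness_make_scale : String := "Am"

def Spec_make_scale (key : String) (out : List Int) : Prop := out = make_scale_alt key
instance (key : String) (out : List Int) : Decidable (Spec_make_scale key out) := by unfold Spec_make_scale; infer_instance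

-- ===== CLAIM =====
def Claim_equal_make_scale : Prop :=
  ∀ (key : String), Dom_make_scale key → Pre_make_scale key → Spec_make_scale key (make_scale key)

-- ===== LEMMAS AND PROOFS =====

-- ===== VERDICT =====
theorem make_scale_spec : Claim_equal_make_scale := by
  intro key _ _
  unfold Spec_make_scale make_scale make_scale_alt
  cases h0 : PySem.Str.pyGet? key 0 with
  | none => rfl
  | some c0 =>
    cases hr : PySem.Dict.get? chordNum c0 with
    | none => simp [hr]
    | some root =>
      by_cases hm : PySem.List.pyGet? key.toList (-1) = some 'm' <;>
        simp [hr, hm, List.foldl] <;> ring_nf <;> simp
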